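-- pv_equiv track=rewrite | github.com/tdcasual/teacherAgent | services/api/exam_score_processing_service.py | normalize_objective_answer
-- ===== SOURCE A (Python) =====
-- def normalize_objective_answer(value: str) -> str:
--     s = (value or "").strip().upper()
--     letters = [ch for ch in s if "A" <= ch <= "Z"]
--     if not letters:
--         return s
--     if len(letters) == 1:
--         return letters[0]
--     return "".join(sorted(set(letters)))
-- ===== SOURCE B (Python) =====
-- def normalize_objective_answer(value: str) -> str:
--     s = (value or "").strip().upper()
--     present = [False] * 26
--     any_letter = False
--     for ch in s:
--         if "A" <= ch <= "Z":
--             present[ord(ch) - 65] = True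
--             any_letter = True
--     if not any_letter:
--         return s
--     return "".join(chr(65 + i) for i in range(26) if present[i])
-- ===== Notes on version B (the rewrite author's own statement) =====
-- stated objective: alternative
-- what changed: Replaces filter + sorted(set(...)) and the len==1 special case with a one-pass boolean bucket over the 26 letters followed by an ordered alphabet scan, so no sort and no set are built.
import Mathlib
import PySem

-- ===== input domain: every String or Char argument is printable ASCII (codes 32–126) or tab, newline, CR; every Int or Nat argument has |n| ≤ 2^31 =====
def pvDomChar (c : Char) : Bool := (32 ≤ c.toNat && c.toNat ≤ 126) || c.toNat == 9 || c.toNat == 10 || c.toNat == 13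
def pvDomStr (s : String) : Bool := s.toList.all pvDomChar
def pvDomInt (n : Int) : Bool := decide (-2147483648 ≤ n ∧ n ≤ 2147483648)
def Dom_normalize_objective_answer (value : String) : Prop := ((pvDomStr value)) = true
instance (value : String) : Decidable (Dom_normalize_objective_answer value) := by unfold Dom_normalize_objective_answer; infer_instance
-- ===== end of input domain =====

-- B replaces filter + sorted(set(...)) (and the len==1 special case) by a one-pass 26-bucket
-- presence array followed by an ordered alphabet scan; same return value, no sort and no set.

-- ===== PORT A =====
def normalize_objective_answer (value : String) : String :=
  let s := PySem.Str.upper (PySem.Str.strip (if value = "" then "" else value))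
  let letters := s.toList.filter (fun ch => decide ('A' ≤ ch ∧ ch ≤ 'Z'))
  if letters = [] then s
  else if letters.length = 1 then String.ofList (PySem.List.pyGet? letters 0).toList
  else String.ofList (PySem.List.sorted (PySem.Set.ofList letters) (fun c => c) false)

-- ===== PORT B =====
def normalize_objective_answer_alt (value : String) : String :=
  let s := PySem.Str.upper (PySem.Str.strip (if value = "" then "" else value))
  let st := s.toList.foldl
    (fun (acc : List Bool × Bool) ch =>
      if 'A' ≤ ch ∧ ch ≤ 'Z' then (acc.1.set (ch.toNat - 65) true, true) else acc)
    (List.replicate 26 false, false)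
  if st.2 = false then s
  else String.ofList ((List.range 26).filterMap
    (fun i => if st.1.getD i false then some (Char.ofNat (65 + i)) else none))

-- ===== PRECONDITION & SPEC =====
def Spec_normalize_objective_answer (value : String) (out : String) : Prop := out = normalize_objective_answer_alt value
instance (value : String) (out : String) : Decidable (Spec_normalize_objective_answer value out) := by unfold Spec_normalize_objective_answer; infer_instance

-- ===== CLAIM (what is proved, stated in full; the proofs are below) =====
def Claim_equal_normalize_objective_answer : Prop := ∀ (value : String), Dom_normalize_objective_answer value → Spec_normalize_objective_answer value (normalize_objective_answer value)

-- ===== LEMMAS AND PROOFS =====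

theorem pv_char_le_iff (c d : Char) : c ≤ d ↔ c.toNat ≤ d.toNat := by
  rw [Char.le_def, UInt32.le_iff_toNat_le]; rfl

theorem pv_char_lt_iff (c d : Char) : c < d ↔ c.toNat < d.toNat := by
  rw [Char.lt_def, UInt32.lt_iff_toNat_lt]; rfl

theorem pv_char_ext (c d : Char) (h : c.toNat = d.toNat) : c = d := by
  rw [← Char.ofNat_toNat c, ← Char.ofNat_toNat d, h]

theorem pv_toNat_ofNat (i : Nat) (hi : i < 26) : (Char.ofNat (65 + i)).toNat = 65 + i := by
  rw [Char.toNat_ofNat, if_pos (Or.inl (by omega))]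

-- the fixed alphabet, in proof terms
def pvAlpha : List Char := (List.range 26).map (fun i => Char.ofNat (65 + i))

theorem pv_mem_alpha (c : Char) : c ∈ pvAlpha ↔ ('A' ≤ c ∧ c ≤ 'Z') := by
  constructor
  · intro h
    simp only [pvAlpha, List.mem_map, List.mem_range] at h
    obtain ⟨i, hi, rfl⟩ := h
    rw [pv_char_le_iff, pv_char_le_iff, pv_toNat_ofNat i hi]
    have hA : ('A' : Char).toNat = 65 := rfl
    have hZ : ('Z' : Char).toNat = 90 := rfl
    rw [hA, hZ]
    omega
  · intro ⟨h1, h2⟩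
    rw [pv_char_le_iff] at h1 h2
    have hA : ('A' : Char).toNat = 65 := rfl
    have hZ : ('Z' : Char).toNat = 90 := rfl
    rw [hA] at h1; rw [hZ] at h2
    simp only [pvAlpha, List.mem_map, List.mem_range]
    refine ⟨c.toNat - 65, by omega, ?_⟩
    apply pv_char_ext
    rw [pv_toNat_ofNat _ (by omega)]; omega

theorem pv_pairwise_alpha : pvAlpha.Pairwise (· < ·) := by
  rw [pvAlpha, List.pairwise_map]
  refine List.pairwise_lt_range.imp_of_mem ?_
  intro a b ha hb hab
  rw [List.mem_range] at ha hb
  rw [pv_char_lt_iff, pv_toNat_ofNat _ ha, pv_toNat_ofNat _ hb]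
  omega

theorem pv_filterMap_if {α β : Type} [DecidableEq β] (l : List α) (g : α → β) (q : β → Bool) :
    l.filterMap (fun i => if q (g i) then some (g i) else none)
      = (l.map g).filter q := by
  induction l with
  | nil => rfl
  | cons a t ih =>
      simp only [List.filterMap_cons, List.map_cons, List.filter_cons]
      by_cases h : q (g a) = true
      · simp [h, ih]
      · have h' : q (g a) = false := by simpa using h
        simp [h', ih]

-- sorted(set(letters)) is exactly the alphabet scan, for letters all in A..Z
theorem pv_sorted_letters (letters : List Char)
    (hlet : ∀ c ∈ letters, 'A' ≤ c ∧ c ≤ 'Z') :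
    PySem.List.sorted (PySem.Set.ofList letters) (fun c => c) false
      = (List.range 26).filterMap
          (fun i => if decide (Char.ofNat (65 + i) ∈ letters) then some (Char.ofNat (65 + i)) else none) := by
  have hys : (List.range 26).filterMap
      (fun i => if decide (Char.ofNat (65 + i) ∈ letters) then some (Char.ofNat (65 + i)) else none)
      = pvAlpha.filter (fun c => decide (c ∈ letters)) := by
    rw [pv_filterMap_if (List.range 26) (fun i => Char.ofNat (65 + i)) (fun c => decide (c ∈ letters))]
    rfl
  rw [hys]
  have hpw : (pvAlpha.filter (fun c => decide (c ∈ letters))).Pairwise (· < ·) :=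
    pv_pairwise_alpha.filter _
  have hnd : (pvAlpha.filter (fun c => decide (c ∈ letters))).Nodup :=
    hpw.imp (fun h => ne_of_lt h)
  have hperm : (pvAlpha.filter (fun c => decide (c ∈ letters))).Perm (PySem.Set.ofList letters) := by
    rw [List.perm_ext_iff_of_nodup hnd (PySem.Set.nodup_ofList letters)]
    intro c
    simp only [List.mem_filter, PySem.Set.mem_ofList, decide_eq_true_eq]
    constructor
    · exact fun h => h.2
    · exact fun h => ⟨(pv_mem_alpha c).mpr (hlet c h), h⟩
  exact PySem.List.sorted_eq_of_perm_of_pairwise_lt _ _ _ hperm hpw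

-- the loop's "any_letter" flag
theorem pv_fold_snd (L : List Char) (acc : List Bool × Bool) :
    (L.foldl
      (fun (acc : List Bool × Bool) ch =>
        if 'A' ≤ ch ∧ ch ≤ 'Z' then (acc.1.set (ch.toNat - 65) true, true) else acc) acc).2
      = (acc.2 || L.any (fun ch => decide ('A' ≤ ch ∧ ch ≤ 'Z'))) := by
  induction L generalizing acc with
  | nil => simp
  | cons c t ih =>
      simp only [List.foldl_cons, List.any_cons]
      by_cases h : 'A' ≤ c ∧ c ≤ 'Z'
      · simp [h, ih]
      · simp [h, ih]

-- the loop's presence buckets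
theorem pv_fold_fst (L : List Char) (pr : List Bool) (b : Bool) (i : Nat)
    (hi : i < 26) (hlen : pr.length = 26) :
    (L.foldl
      (fun (acc : List Bool × Bool) ch =>
        if 'A' ≤ ch ∧ ch ≤ 'Z' then (acc.1.set (ch.toNat - 65) true, true) else acc) (pr, b)).1.getD i false
      = (pr.getD i false
          || decide (Char.ofNat (65 + i) ∈ L.filter (fun ch => decide ('A' ≤ ch ∧ ch ≤ 'Z')))) := by
  induction L generalizing pr b with
  | nil => simp
  | cons c t ih =>
      simp only [List.foldl_cons, List.filter_cons]
      by_cases h : 'A' ≤ c ∧ c ≤ 'Z'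
      · have hc1 : 65 ≤ c.toNat := by
          have := (pv_char_le_iff 'A' c).mp h.1; simpa using this
        have hc2 : c.toNat ≤ 90 := by
          have := (pv_char_le_iff c 'Z').mp h.2; simpa using this
        rw [if_pos h, if_pos (by exact decide_eq_true_eq.mpr h ▸ rfl)]
        rw [ih (pr.set (c.toNat - 65) true) true (by simpa using hlen)]
        have hmem : (Char.ofNat (65 + i) ∈ c :: t.filter (fun ch => decide ('A' ≤ ch ∧ ch ≤ 'Z')))
            ↔ (Char.ofNat (65 + i) = c ∨ Char.ofNat (65 + i) ∈ t.filter (fun ch => decide ('A' ≤ ch ∧ ch ≤ 'Z'))) :=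
          List.mem_cons
        by_cases hij : i = c.toNat - 65
        · have hceq : c = Char.ofNat (65 + i) := by
            apply pv_char_ext; rw [pv_toNat_ofNat i hi]; omega
          have hset : (pr.set (c.toNat - 65) true).getD i false = true := by
            rw [List.getD_eq_getElem?_getD, hij, List.getElem?_set_self (by omega)]
            simp
          have hd : decide (Char.ofNat (65 + i) ∈ c :: t.filter (fun ch => decide ('A' ≤ ch ∧ ch ≤ 'Z'))) = true :=
            decide_eq_true (hmem.mpr (Or.inl hceq.symm))
          rw [hset, hd]
          simp
        · have hcne : c ≠ Char.ofNat (65 + i) := by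
            intro hc
            have := congrArg Char.toNat hc
            rw [pv_toNat_ofNat i hi] at this
            omega
          have hset : (pr.set (c.toNat - 65) true).getD i false = pr.getD i false := by
            rw [List.getD_eq_getElem?_getD, List.getElem?_set_ne (by omega), ← List.getD_eq_getElem?_getD]
          rw [hset]
          congr 1
          exact decide_eq_decide.mpr (by rw [hmem]; simp [Ne.symm hcne])
      · rw [if_neg h, if_neg (by simp [h]), ih pr b hlen]

theorem pv_filter_nil_any (L : List Char) (p : Char → Bool)
    (h : L.filter p = []) : L.any p = false := by
  simp only [List.filter_eq_nil_iff] at h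
  simp only [List.any_eq_false]
  exact fun x hx => by simpa using h x hx

-- ===== VERDICT (by name: the statement is the Claim_ definition above) =====
theorem normalize_objective_answer_spec : Claim_equal_normalize_objective_answer := by
  intro value _
  unfold Spec_normalize_objective_answer normalize_objective_answer normalize_objective_answer_alt
  set s := PySem.Str.upper (PySem.Str.strip (if value = "" then "" else value)) with hs
  set L := s.toList with hL
  set p : Char → Bool := fun ch => decide ('A' ≤ ch ∧ ch ≤ 'Z') with hp
  set letters := L.filter p with hlet
  have hlen : (List.replicate 26 false).length = 26 := by simp
  have hsnd := pv_fold_snd L (List.replicate 26 false, false)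
  by_cases h0 : letters = []
  · have hany : L.any p = false := pv_filter_nil_any L p h0
    rw [if_pos h0]
    rw [if_pos (by rw [hsnd]; simp [hp] at hany ⊢; exact hany)]
  · have hany : L.any p = true := by
      cases h : L.any p with
      | true => rfl
      | false =>
          refine absurd ?_ h0
          rw [hlet, List.filter_eq_nil_iff]
          intro x hx
          simpa using List.any_eq_false.mp h x hx
    have hne : ¬ ((L.foldl
        (fun (acc : List Bool × Bool) ch =>
          if 'A' ≤ ch ∧ ch ≤ 'Z' then (acc.1.set (ch.toNat - 65) true, true) else acc)
        (List.replicate 26 false, false)).2 = false) := by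
      rw [hsnd]; simp [hp] at hany; simp [hany]
    rw [if_neg h0, if_neg hne]
    have hletters : ∀ c ∈ letters, 'A' ≤ c ∧ c ≤ 'Z' := by
      intro c hc
      have := (List.mem_filter.mp hc).2
      simpa [hp] using this
    -- the bucket scan equals the alphabet-membership scan
    have hbuckets : (List.range 26).filterMap
        (fun i => if (L.foldl
            (fun (acc : List Bool × Bool) ch =>
              if 'A' ≤ ch ∧ ch ≤ 'Z' then (acc.1.set (ch.toNat - 65) true, true) else acc)
            (List.replicate 26 false, false)).1.getD i false
          then some (Char.ofNat (65 + i)) else none)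
        = (List.range 26).filterMap
            (fun i => if decide (Char.ofNat (65 + i) ∈ letters) then some (Char.ofNat (65 + i)) else none) := by
      apply List.filterMap_congr
      intro i hi
      have hrep : (List.replicate 26 false).getD i false = false := by
        rw [List.getD_eq_getElem?_getD, List.getElem?_replicate]
        split <;> rfl
      rw [pv_fold_fst L (List.replicate 26 false) false i (List.mem_range.mp hi) hlen, hrep,
        Bool.false_or]
    rw [hbuckets, ← pv_sorted_letters letters hletters]
    by_cases h1 : letters.length = 1
    · obtain ⟨c, hc⟩ : ∃ c, letters = [c] := List.length_eq_one_iff.mp h1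
      rw [if_pos h1, show List.filter p s.toList = [c] from hc,
        show PySem.List.pyGet? [c] (0 : Int) = some c by
          simp [PySem.List.pyGet?, PySem.List.pyIdx?]]
      rw [hc, PySem.Set.ofList_eq_self_of_nodup [c] (by simp),
        PySem.List.sorted_eq_self_of_pairwise [c] _ (by simp)]
      rfl
    · rw [if_neg h1]
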